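-- pv_equiv track=rewrite | github.com/ashartalatee/Talatee_Data_Nexus | DataNexus/Ragam_Sales_Report_Automation_Engine/MSIDE/src/intelligence/decision.py | add_priority
-- ===== SOURCE A (Python) =====
-- def add_priority(decisions):
--     for d in decisions:
--
--         if d["type"] in ["WARNING"]:
--             d["priority"] = "HIGH"
--
--         elif d["type"] in ["OPPORTUNITY", "SCALE_PRODUCT"]:
--             d["priority"] = "MEDIUM"
--
--         else:
--             d["priority"] = "LOW"
--
--     return decisions
-- ===== SOURCE B (Python) =====
-- def add_priority(decisions):
--     # Staged passes: default everyone to LOW, then promote MEDIUM cases, then HIGH cases.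
--     for d in decisions:
--         d["priority"] = "LOW"
--     for d in decisions:
--         if d["type"] in ("OPPORTUNITY", "SCALE_PRODUCT"):
--             d["priority"] = "MEDIUM"
--     for d in decisions:
--         if d["type"] == "WARNING":
--             d["priority"] = "HIGH"
--     return decisions
-- ===== Notes on version B (the rewrite author's own statement) =====
-- stated objective: alternative
-- what changed: Replaces the per-element if/elif/else cascade with three staged passes over the list: first pass assigns the default 'LOW' to every decision, a second pass promotes OPPORTUNITY/SCALE_PRODUCT entries to 'MEDIUM', a third pass promotes WARNING entries to 'HIGH', each later pass overwriting the earlier in-place assignment.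
import Mathlib
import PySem

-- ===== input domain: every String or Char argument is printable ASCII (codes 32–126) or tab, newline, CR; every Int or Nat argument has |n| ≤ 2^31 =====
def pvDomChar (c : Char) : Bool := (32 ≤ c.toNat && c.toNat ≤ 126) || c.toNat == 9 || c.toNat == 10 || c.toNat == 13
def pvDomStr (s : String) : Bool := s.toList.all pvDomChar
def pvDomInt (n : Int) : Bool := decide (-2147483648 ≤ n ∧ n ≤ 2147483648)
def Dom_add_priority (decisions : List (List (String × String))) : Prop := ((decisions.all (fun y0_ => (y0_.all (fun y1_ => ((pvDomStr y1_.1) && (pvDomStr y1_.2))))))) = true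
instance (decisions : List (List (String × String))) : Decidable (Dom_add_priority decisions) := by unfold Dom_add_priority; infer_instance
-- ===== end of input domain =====

-- B replaces A's single-pass if/elif/else cascade with three staged passes (default LOW, then
-- promote MEDIUM, then promote HIGH); both mutate each dict in place, equivalence is about the return value.

-- ===== PORT A =====
def add_priority (decisions : List (List (String × String))) : List (List (String × String)) :=
  decisions.map (fun d0 =>
    let d := PySem.Dict.ofList d0
    -- d["type"]: KeyError (excluded by Pre_) modelled by the .getD "" default
    let t := (PySem.Dict.get? d "type").getD ""
    if (["WARNING"] : List String).contains t then
      (PySem.Dict.insert d "priority" "HIGH").items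
    else if (["OPPORTUNITY", "SCALE_PRODUCT"] : List String).contains t then
      (PySem.Dict.insert d "priority" "MEDIUM").items
    else
      (PySem.Dict.insert d "priority" "LOW").items)

-- ===== PORT B =====
def add_priority_alt (decisions : List (List (String × String))) : List (List (String × String)) :=
  let ds := decisions.map PySem.Dict.ofList
  -- pass 1: everyone gets the default
  let s1 := ds.map (fun d => PySem.Dict.insert d "priority" "LOW")
  -- pass 2: promote MEDIUM cases (d["type"] modelled as in port A)
  let s2 := s1.map (fun d =>
    if (["OPPORTUNITY", "SCALE_PRODUCT"] : List String).contains ((PySem.Dict.get? d "type").getD "") then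
      PySem.Dict.insert d "priority" "MEDIUM"
    else d)
  -- pass 3: promote HIGH cases
  let s3 := s2.map (fun d =>
    if ((PySem.Dict.get? d "type").getD "") = "WARNING" then
      PySem.Dict.insert d "priority" "HIGH"
    else d)
  s3.map PySem.Dict.items

-- ===== PRECONDITION & SPEC =====
-- Pre_ excludes dicts without a "type" key, on which both A and B raise KeyError.
def Pre_add_priority (decisions : List (List (String × String))) : Prop :=
  (decisions.all (fun d => d.any (fun p => p.1 == "type"))) = true
instance (decisions : List (List (String × String))) : Decidable (Pre_add_priority decisions) := by
  unfold Pre_add_priority; infer_instance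

def pvWitness_add_priority : (List (List (String × String))) :=
  [[("type", "WARNING")], [("type", "GROW"), ("sku", "A1")]]

def Spec_add_priority (decisions : List (List (String × String))) (out : List (List (String × String))) : Prop := out = add_priority_alt decisions
instance (decisions : List (List (String × String))) (out : List (List (String × String))) : Decidable (Spec_add_priority decisions out) := by unfold Spec_add_priority; infer_instance

-- ===== CLAIM (what is proved, stated in full; the proofs are below) =====
def Claim_equal_add_priority : Prop := ∀ (decisions : List (List (String × String))), Dom_add_priority decisions → Pre_add_priority decisions → Spec_add_priority decisions (add_priority decisions)

-- ===== LEMMAS AND PROOFS =====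
lemma type_after_low (d : PySem.Dict String String) :
    PySem.Dict.get? (PySem.Dict.insert d "priority" "LOW") "type" = PySem.Dict.get? d "type" :=
  PySem.Dict.get?_insert_of_ne d "LOW" (by decide)

lemma type_after_medium (d : PySem.Dict String String) :
    PySem.Dict.get? (PySem.Dict.insert d "priority" "MEDIUM") "type" = PySem.Dict.get? d "type" :=
  PySem.Dict.get?_insert_of_ne d "MEDIUM" (by decide)

lemma staged_eq_cascade (d : PySem.Dict String String) :
    (if (["WARNING"] : List String).contains ((PySem.Dict.get? d "type").getD "") = true then
       PySem.Dict.insert d "priority" "HIGH"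
     else if (["OPPORTUNITY", "SCALE_PRODUCT"] : List String).contains ((PySem.Dict.get? d "type").getD "") = true then
       PySem.Dict.insert d "priority" "MEDIUM"
     else PySem.Dict.insert d "priority" "LOW") =
    (if ((PySem.Dict.get? (if (["OPPORTUNITY", "SCALE_PRODUCT"] : List String).contains ((PySem.Dict.get? (PySem.Dict.insert d "priority" "LOW") "type").getD "") = true then
            PySem.Dict.insert (PySem.Dict.insert d "priority" "LOW") "priority" "MEDIUM"
          else PySem.Dict.insert d "priority" "LOW") "type").getD "") = "WARNING" then
       PySem.Dict.insert (if (["OPPORTUNITY", "SCALE_PRODUCT"] : List String).contains ((PySem.Dict.get? (PySem.Dict.insert d "priority" "LOW") "type").getD "") = true then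
            PySem.Dict.insert (PySem.Dict.insert d "priority" "LOW") "priority" "MEDIUM"
          else PySem.Dict.insert d "priority" "LOW") "priority" "HIGH"
     else (if (["OPPORTUNITY", "SCALE_PRODUCT"] : List String).contains ((PySem.Dict.get? (PySem.Dict.insert d "priority" "LOW") "type").getD "") = true then
            PySem.Dict.insert (PySem.Dict.insert d "priority" "LOW") "priority" "MEDIUM"
          else PySem.Dict.insert d "priority" "LOW")) := by
  simp only [type_after_low]
  by_cases hm : (["OPPORTUNITY", "SCALE_PRODUCT"] : List String).contains ((PySem.Dict.get? d "type").getD "") = true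
  · have hw : ((["WARNING"] : List String).contains ((PySem.Dict.get? d "type").getD "")) = false := by
      rcases (by simpa using hm : _ ∨ _) with h | h <;> simp [h]
    have hnw : ¬ ((PySem.Dict.get? d "type").getD "") = "WARNING" := by
      rcases (by simpa using hm : _ ∨ _) with h | h <;> simp [h]
    simp only [hm, if_true, hw, Bool.false_eq_true, if_false, type_after_medium, hnw,
      PySem.Dict.insert_insert_self]
  · have hm' : (["OPPORTUNITY", "SCALE_PRODUCT"] : List String).contains ((PySem.Dict.get? d "type").getD "") = false := by
      simpa using hm
    simp only [hm', Bool.false_eq_true, if_false, type_after_low]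
    by_cases hw : ((PySem.Dict.get? d "type").getD "") = "WARNING"
    · simp [hw, PySem.Dict.insert_insert_self]
    · simp [hw]

-- ===== VERDICT (by name: the statement is the Claim_ definition above) =====
theorem add_priority_spec : Claim_equal_add_priority := by
  intro decisions _ _
  unfold Spec_add_priority add_priority add_priority_alt
  simp only [List.map_map]
  refine List.map_congr_left (fun d0 _ => ?_)
  simp only [Function.comp]
  conv_lhs => rw [← apply_ite PySem.Dict.items, ← apply_ite PySem.Dict.items]
  exact congrArg _ (staged_eq_cascade _)
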